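-- pv_equiv track=rewrite | github.com/rez3vil/PandaDock | pandadock/io/ligand_preparer.py | extract_atom_types_from_smiles
-- ===== SOURCE A (Python) =====
-- from typing import List, Dict, Any, Optional, Tuple
--
-- def extract_atom_types_from_smiles(smiles: str) -> List[str]:
--     """Extract atom types from SMILES string"""
--     # Simplified extraction
--     # In practice, would use proper SMILES parser
--
--     atom_types = []
--     i = 0
--     while i < len(smiles):
--         char = smiles[i]
--
--         # Check for two-letter atoms
--         if i + 1 < len(smiles):
--             two_char = smiles[i:i+2]
--             if two_char in {'Cl', 'Br'}:
--                 atom_types.append(two_char)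
--                 i += 2
--                 continue
--
--         # Single letter atoms
--         if char in 'CNOPSFHI':
--             atom_types.append(char)
--
--         i += 1
--
--     # Add implicit hydrogens
--     for _ in range(len(atom_types) // 2):
--         atom_types.append('H')
--
--     return atom_types
-- ===== SOURCE B (Python) =====
-- def extract_atom_types_from_smiles(smiles: str):
--     """Extract atom types from SMILES string.
--
--     Right-to-left scan with an accumulator: occurrences of 'Cl'/'Br' can never
--     overlap each other, so scanning direction does not change the token list.
--     """
--     atoms = []
--     i = len(smiles)
--     while i > 0:
--         if i >= 2 and smiles[i-2:i] in ('Cl', 'Br'):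
--             atoms.append(smiles[i-2:i])
--             i -= 2
--         else:
--             c = smiles[i-1]
--             if c in 'CNOPSFHI':
--                 atoms.append(c)
--             i -= 1
--     atoms.reverse()
--     atoms += ['H'] * (len(atoms) // 2)
--     return atoms
-- ===== Notes on version B (the rewrite author's own statement) =====
-- stated objective: alternative
-- what changed: B scans the string right-to-left with an accumulator instead of A's left-to-right index-advancing parser (occurrences of 'Cl'/'Br' can never overlap, so the traversal direction does not change the token list, which is proved), and appends the implicit hydrogens by list replication instead of a counting loop.
import Mathlib
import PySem

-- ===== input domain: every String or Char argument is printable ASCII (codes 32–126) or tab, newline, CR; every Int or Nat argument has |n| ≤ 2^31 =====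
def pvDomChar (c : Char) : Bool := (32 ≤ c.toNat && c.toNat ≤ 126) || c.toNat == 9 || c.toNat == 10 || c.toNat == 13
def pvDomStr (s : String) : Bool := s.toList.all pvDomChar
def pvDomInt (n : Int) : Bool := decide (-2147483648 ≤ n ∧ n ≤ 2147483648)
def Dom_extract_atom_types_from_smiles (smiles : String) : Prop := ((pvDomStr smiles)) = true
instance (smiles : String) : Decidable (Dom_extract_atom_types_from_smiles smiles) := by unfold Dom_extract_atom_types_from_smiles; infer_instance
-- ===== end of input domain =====

-- B replaces A's left-to-right index-advancing scan by a right-to-left scan with an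
-- accumulator (occurrences of 'Cl'/'Br' never overlap, so direction is irrelevant)
-- and appends the implicit hydrogens by list replication instead of a counting loop.

-- the single-letter atoms both programs recognise ('CNOPSFHI')
def pvSingles : List Char := ['C', 'N', 'O', 'P', 'S', 'F', 'H', 'I']

-- ===== PORT A =====
-- A's while-loop: index i advances by 2 on a two-letter atom, else by 1; the list
-- append becomes the cons of this recursion. smiles[i:i+2] = take 2 (drop i).
def pvAGo (cs : List Char) (i : Nat) : List String :=
  if h : i < cs.length then
    let char := cs[i]
    if i + 1 < cs.length ∧
        (List.take 2 (List.drop i cs) = ['C', 'l'] ∨ List.take 2 (List.drop i cs) = ['B', 'r']) then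
      String.ofList (List.take 2 (List.drop i cs)) :: pvAGo cs (i + 2)
    else if char ∈ pvSingles then
      char.toString :: pvAGo cs (i + 1)
    else
      pvAGo cs (i + 1)
  else []
termination_by cs.length - i

def extract_atom_types_from_smiles (smiles : String) : List String :=
  let atom_types := pvAGo smiles.toList 0
  -- for _ in range(len(atom_types) // 2): atom_types.append('H')
  (List.range (atom_types.length / 2)).foldl (fun l _ => l ++ ["H"]) atom_types

-- ===== PORT B =====
-- B's while-loop runs i from len(smiles) down to 0; Python appends the tokens in
-- right-to-left order and reverses at the end, which the cons accumulator realises.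
def pvBGo (cs : List Char) (i : Nat) (acc : List String) : List String :=
  if i = 0 then acc
  else if 2 ≤ i ∧
      (List.take 2 (List.drop (i - 2) cs) = ['C', 'l'] ∨ List.take 2 (List.drop (i - 2) cs) = ['B', 'r']) then
    pvBGo cs (i - 2) (String.ofList (List.take 2 (List.drop (i - 2) cs)) :: acc)
  else
    let c := cs.getD (i - 1) ' '
    if c ∈ pvSingles then pvBGo cs (i - 1) (c.toString :: acc)
    else pvBGo cs (i - 1) acc
termination_by i

def extract_atom_types_from_smiles_alt (smiles : String) : List String :=
  let atoms := pvBGo smiles.toList smiles.toList.length []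
  atoms ++ List.replicate (atoms.length / 2) "H"

-- ===== PRECONDITION & SPEC =====
def Spec_extract_atom_types_from_smiles (smiles : String) (out : List String) : Prop := out = extract_atom_types_from_smiles_alt smiles
instance (smiles : String) (out : List String) : Decidable (Spec_extract_atom_types_from_smiles smiles out) := by unfold Spec_extract_atom_types_from_smiles; infer_instance

-- ===== CLAIM (what is proved, stated in full; the proofs are below) =====
def Claim_equal_extract_atom_types_from_smiles : Prop := ∀ (smiles : String), Dom_extract_atom_types_from_smiles smiles → Spec_extract_atom_types_from_smiles smiles (extract_atom_types_from_smiles smiles)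

-- ===== LEMMAS AND PROOFS =====

-- canonical front-structural tokenizer; both scans are proved equal to it
def pvTokens : List Char → List String
  | [] => []
  | [c] => if c ∈ pvSingles then [c.toString] else []
  | c1 :: c2 :: rest =>
    if [c1, c2] = ['C', 'l'] then "Cl" :: pvTokens rest
    else if [c1, c2] = ['B', 'r'] then "Br" :: pvTokens rest
    else (if c1 ∈ pvSingles then [c1.toString] else []) ++ pvTokens (c2 :: rest)

theorem pvTake2_drop (cs : List Char) (i j : Nat) (hij : i + 1 = j) (hj : j < cs.length) :
    List.take 2 (cs.drop i) = [cs[i], cs[j]] := by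
  subst hij
  rw [List.drop_eq_getElem_cons (by omega : i < cs.length),
      List.drop_eq_getElem_cons hj]
  rfl

theorem pvTake_succ_last (cs : List Char) (i j : Nat) (hij : i + 1 = j) (hi : i < cs.length) :
    cs.take j = cs.take i ++ [cs[i]] := by
  subst hij
  rw [List.take_succ, List.getElem?_eq_getElem hi]
  rfl

-- appending a full 'Cl' occurrence appends its token (no pattern ends in 'C')
theorem pvTokens_append_Cl (xs : List Char) :
    pvTokens (xs ++ ['C', 'l']) = pvTokens xs ++ ["Cl"] := by
  have n1 : ∀ c : Char, ¬ [c, 'C'] = ['C', 'l'] := by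
    intro c h; simp at h
  have n2 : ∀ c : Char, ¬ [c, 'C'] = ['B', 'r'] := by
    intro c h; simp at h
  induction xs using pvTokens.induct with
  | case1 => simp [pvTokens]
  | case2 c hc => simp [pvTokens, hc, n1 c, n2 c]
  | case3 c hc => simp [pvTokens, hc, n1 c, n2 c]
  | case4 c1 c2 rest h ih =>
      simp only [List.cons_append, pvTokens]
      rw [if_pos h, if_pos h, ih]
      simp
  | case5 c1 c2 rest h1 h2 ih =>
      simp only [List.cons_append, pvTokens]
      rw [if_neg h1, if_neg h1, if_pos h2, if_pos h2, ih]
      simp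
  | case6 c1 c2 rest h1 h2 ih =>
      simp only [List.cons_append] at ih ⊢
      simp only [pvTokens]
      rw [if_neg h1, if_neg h1, if_neg h2, if_neg h2, ih, List.append_assoc]

-- appending a full 'Br' occurrence appends its token (no pattern ends in 'B')
theorem pvTokens_append_Br (xs : List Char) :
    pvTokens (xs ++ ['B', 'r']) = pvTokens xs ++ ["Br"] := by
  have n1 : ∀ c : Char, ¬ [c, 'B'] = ['C', 'l'] := by
    intro c h; simp at h
  have n2 : ∀ c : Char, ¬ [c, 'B'] = ['B', 'r'] := by
    intro c h; simp at h
  induction xs using pvTokens.induct with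
  | case1 => simp [pvTokens]
  | case2 c hc => simp [pvTokens, hc, n1 c, n2 c]
  | case3 c hc => simp [pvTokens, hc, n1 c, n2 c]
  | case4 c1 c2 rest h ih =>
      simp only [List.cons_append, pvTokens]
      rw [if_pos h, if_pos h, ih]
      simp
  | case5 c1 c2 rest h1 h2 ih =>
      simp only [List.cons_append, pvTokens]
      rw [if_neg h1, if_neg h1, if_pos h2, if_pos h2, ih]
      simp
  | case6 c1 c2 rest h1 h2 ih =>
      simp only [List.cons_append] at ih ⊢
      simp only [pvTokens]
      rw [if_neg h1, if_neg h1, if_neg h2, if_neg h2, ih, List.append_assoc]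

theorem pvTokens_append_pair (xs : List Char) (a b : Char)
    (hab : [a, b] = ['C', 'l'] ∨ [a, b] = ['B', 'r']) :
    pvTokens (xs ++ [a, b]) = pvTokens xs ++ [String.ofList [a, b]] := by
  rcases hab with h | h
  · obtain ⟨rfl, rfl⟩ : a = 'C' ∧ b = 'l' := by simpa using h
    rw [show String.ofList ['C', 'l'] = "Cl" from rfl]
    exact pvTokens_append_Cl xs
  · obtain ⟨rfl, rfl⟩ : a = 'B' ∧ b = 'r' := by simpa using h
    rw [show String.ofList ['B', 'r'] = "Br" from rfl]
    exact pvTokens_append_Br xs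

-- appending a single char that does not complete a pair with xs's last char
theorem pvTokens_append_single (xs : List Char) (c : Char)
    (hc : ∀ a, xs.getLast? = some a → ¬([a, c] = ['C', 'l'] ∨ [a, c] = ['B', 'r'])) :
    pvTokens (xs ++ [c]) = pvTokens xs ++ (if c ∈ pvSingles then [c.toString] else []) := by
  induction xs using pvTokens.induct with
  | case1 => simp [pvTokens]
  | case2 a ha =>
      have h := hc a (by simp)
      have h1 : ¬ [a, c] = ['C', 'l'] := fun hh => h (Or.inl hh)
      have h2 : ¬ [a, c] = ['B', 'r'] := fun hh => h (Or.inr hh)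
      simp only [List.cons_append, List.nil_append, pvTokens]
      rw [if_neg h1, if_neg h2]
  | case3 a ha =>
      have h := hc a (by simp)
      have h1 : ¬ [a, c] = ['C', 'l'] := fun hh => h (Or.inl hh)
      have h2 : ¬ [a, c] = ['B', 'r'] := fun hh => h (Or.inr hh)
      simp only [List.cons_append, List.nil_append, pvTokens]
      rw [if_neg h1, if_neg h2]
  | case4 c1 c2 rest h ih =>
      cases rest with
      | nil =>
          simp only [List.cons_append, List.nil_append, pvTokens]
          rw [if_pos h, if_pos h]
          simp [pvTokens]
      | cons r rs =>
          have hc' : ∀ a, (r :: rs).getLast? = some a → ¬([a, c] = ['C', 'l'] ∨ [a, c] = ['B', 'r']) := by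
            intro a ha
            exact hc a (by rw [List.getLast?_cons_cons, List.getLast?_cons_cons]; exact ha)
          have ih' := ih hc'
          simp only [List.cons_append] at ih' ⊢
          simp only [pvTokens]
          rw [if_pos h, if_pos h, ih']
          simp
  | case5 c1 c2 rest h1 h2 ih =>
      cases rest with
      | nil =>
          simp only [List.cons_append, List.nil_append, pvTokens]
          rw [if_neg h1, if_neg h1, if_pos h2, if_pos h2]
          simp [pvTokens]
      | cons r rs =>
          have hc' : ∀ a, (r :: rs).getLast? = some a → ¬([a, c] = ['C', 'l'] ∨ [a, c] = ['B', 'r']) := by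
            intro a ha
            exact hc a (by rw [List.getLast?_cons_cons, List.getLast?_cons_cons]; exact ha)
          have ih' := ih hc'
          simp only [List.cons_append] at ih' ⊢
          simp only [pvTokens]
          rw [if_neg h1, if_neg h1, if_pos h2, if_pos h2, ih']
          simp
  | case6 c1 c2 rest h1 h2 ih =>
      have hc' : ∀ a, (c2 :: rest).getLast? = some a → ¬([a, c] = ['C', 'l'] ∨ [a, c] = ['B', 'r']) := by
        intro a ha
        exact hc a (by rw [List.getLast?_cons_cons]; exact ha)
      have ih' := ih hc'
      simp only [List.cons_append] at ih' ⊢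
      simp only [pvTokens]
      rw [if_neg h1, if_neg h1, if_neg h2, if_neg h2, ih', List.append_assoc]

-- A's scan from position i computes the tokens of the remaining suffix
theorem pvAGo_eq_tokens (cs : List Char) (i : Nat) :
    pvAGo cs i = pvTokens (cs.drop i) := by
  induction i using pvAGo.induct cs with
  | case1 i hi hp ih =>
      have h1 : i + 1 < cs.length := hp.1
      have etake := pvTake2_drop cs i (i + 1) rfl h1
      have e1 : cs.drop i = cs[i] :: cs[i + 1] :: cs.drop (i + 2) := by
        rw [List.drop_eq_getElem_cons (by omega : i < cs.length),
            List.drop_eq_getElem_cons h1]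
      rw [pvAGo]
      simp only [hi, dif_pos]
      rw [if_pos hp]
      rcases hp.2 with h2 | h2
      · rw [etake] at h2
        simp at h2
        rw [etake, e1, h2.1, h2.2, ih]
        rw [show String.ofList ['C', 'l'] = "Cl" from rfl]
        simp [pvTokens]
      · rw [etake] at h2
        simp at h2
        rw [etake, e1, h2.1, h2.2, ih]
        rw [show String.ofList ['B', 'r'] = "Br" from rfl]
        simp [pvTokens]
  | case2 i hi char hnp hs ih =>
      have hchar : char = cs[i] := rfl
      rw [hchar] at hs
      have e1 : cs.drop i = cs[i] :: cs.drop (i + 1) := List.drop_eq_getElem_cons hi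
      rw [pvAGo]
      simp only [hi, dif_pos]
      rw [if_neg hnp, if_pos hs, ih, e1]
      cases hd : cs.drop (i + 1) with
      | nil => simp [pvTokens, hs]
      | cons d ds =>
          have h1 : i + 1 < cs.length := by
            by_contra hh
            rw [List.drop_of_length_le (by omega)] at hd
            exact absurd hd (by simp)
          have etake := pvTake2_drop cs i (i + 1) rfl h1
          have hd1 : d = cs[i + 1] := by
            have := List.drop_eq_getElem_cons h1
            rw [hd] at this; exact (List.cons.injEq _ _ _ _ ▸ this).1
          have hn : ¬(List.take 2 (cs.drop i) = ['C', 'l'] ∨ List.take 2 (cs.drop i) = ['B', 'r']) := by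
            intro hh; exact hnp ⟨h1, hh⟩
          rw [etake] at hn
          have hn1 : ¬ [cs[i], d] = ['C', 'l'] := by rw [hd1]; tauto
          have hn2 : ¬ [cs[i], d] = ['B', 'r'] := by rw [hd1]; tauto
          simp [pvTokens, hn1, hn2, hs]
  | case3 i hi char hnp hs ih =>
      have hchar : char = cs[i] := rfl
      rw [hchar] at hs
      have e1 : cs.drop i = cs[i] :: cs.drop (i + 1) := List.drop_eq_getElem_cons hi
      rw [pvAGo]
      simp only [hi, dif_pos]
      rw [if_neg hnp, if_neg hs, ih, e1]
      cases hd : cs.drop (i + 1) with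
      | nil => simp [pvTokens, hs]
      | cons d ds =>
          have h1 : i + 1 < cs.length := by
            by_contra hh
            rw [List.drop_of_length_le (by omega)] at hd
            exact absurd hd (by simp)
          have etake := pvTake2_drop cs i (i + 1) rfl h1
          have hd1 : d = cs[i + 1] := by
            have := List.drop_eq_getElem_cons h1
            rw [hd] at this; exact (List.cons.injEq _ _ _ _ ▸ this).1
          have hn : ¬(List.take 2 (cs.drop i) = ['C', 'l'] ∨ List.take 2 (cs.drop i) = ['B', 'r']) := by
            intro hh; exact hnp ⟨h1, hh⟩
          rw [etake] at hn
          have hn1 : ¬ [cs[i], d] = ['C', 'l'] := by rw [hd1]; tauto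
          have hn2 : ¬ [cs[i], d] = ['B', 'r'] := by rw [hd1]; tauto
          simp [pvTokens, hn1, hn2, hs]
  | case4 i hi =>
      rw [pvAGo]
      simp only [hi, dif_neg, not_false_iff]
      rw [List.drop_of_length_le (by omega)]
      simp [pvTokens]

-- B's countdown scan computes the tokens of the processed prefix
theorem pvBGo_eq_tokens (cs : List Char) (i : Nat) (acc : List String) (hlen : i ≤ cs.length) :
    pvBGo cs i acc = pvTokens (cs.take i) ++ acc := by
  induction i, acc using pvBGo.induct cs with
  | case1 acc => simp [pvBGo, pvTokens]
  | case2 i acc hi0 hp ih =>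
      have h2 : 2 ≤ i := hp.1
      have h1 : i - 1 < cs.length := by omega
      have etake2 := pvTake2_drop cs (i - 2) (i - 1) (by omega) h1
      have e1 : cs.take i = cs.take (i - 2) ++ [cs[i - 2], cs[i - 1]] := by
        have hb := pvTake_succ_last cs (i - 2) (i - 1) (by omega) (by omega)
        have ha := pvTake_succ_last cs (i - 1) i (by omega) h1
        rw [ha, hb, List.append_assoc]
        rfl
      have hpat : [cs[i - 2], cs[i - 1]] = ['C', 'l'] ∨ [cs[i - 2], cs[i - 1]] = ['B', 'r'] := by
        rw [← etake2]; exact hp.2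
      rw [pvBGo, if_neg hi0, if_pos hp, ih (by omega), e1,
          pvTokens_append_pair _ _ _ hpat, etake2]
      simp
  | case3 i acc hi0 hnp cvar hs ih =>
      have h1 : i - 1 < cs.length := by omega
      have hgetd : cs.getD (i - 1) ' ' = cs[i - 1] := List.getD_eq_getElem cs ' ' h1
      have hcv : cvar = cs[i - 1] := hgetd
      rw [hcv] at hs
      try rw [hcv] at ih
      have e1 : cs.take i = cs.take (i - 1) ++ [cs[i - 1]] :=
        pvTake_succ_last cs (i - 1) i (by omega) h1
      have hlast : ∀ a, (cs.take (i - 1)).getLast? = some a →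
          ¬([a, cs[i - 1]] = ['C', 'l'] ∨ [a, cs[i - 1]] = ['B', 'r']) := by
        intro a ha
        rcases Nat.lt_or_ge i 2 with hlt | hge
        · rw [show i - 1 = 0 from by omega] at ha; simp at ha
        · have e2 : cs.take (i - 1) = cs.take (i - 2) ++ [cs[i - 2]] :=
            pvTake_succ_last cs (i - 2) (i - 1) (by omega) (by omega)
          rw [e2, List.getLast?_concat] at ha
          have haa : a = cs[i - 2] := by simp at ha; exact ha.symm
          subst haa
          have etake2 := pvTake2_drop cs (i - 2) (i - 1) (by omega) h1
          intro hh
          exact hnp ⟨hge, by rw [etake2]; exact hh⟩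
      rw [pvBGo, if_neg hi0, if_neg hnp]
      simp only [hgetd]
      rw [if_pos hs, ih (by omega), e1, pvTokens_append_single _ _ hlast]
      simp [hs]
  | case4 i acc hi0 hnp cvar hs ih =>
      have h1 : i - 1 < cs.length := by omega
      have hgetd : cs.getD (i - 1) ' ' = cs[i - 1] := List.getD_eq_getElem cs ' ' h1
      have hcv : cvar = cs[i - 1] := hgetd
      rw [hcv] at hs
      try rw [hcv] at ih
      have e1 : cs.take i = cs.take (i - 1) ++ [cs[i - 1]] :=
        pvTake_succ_last cs (i - 1) i (by omega) h1
      have hlast : ∀ a, (cs.take (i - 1)).getLast? = some a →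
          ¬([a, cs[i - 1]] = ['C', 'l'] ∨ [a, cs[i - 1]] = ['B', 'r']) := by
        intro a ha
        rcases Nat.lt_or_ge i 2 with hlt | hge
        · rw [show i - 1 = 0 from by omega] at ha; simp at ha
        · have e2 : cs.take (i - 1) = cs.take (i - 2) ++ [cs[i - 2]] :=
            pvTake_succ_last cs (i - 2) (i - 1) (by omega) (by omega)
          rw [e2, List.getLast?_concat] at ha
          have haa : a = cs[i - 2] := by simp at ha; exact ha.symm
          subst haa
          have etake2 := pvTake2_drop cs (i - 2) (i - 1) (by omega) h1
          intro hh
          exact hnp ⟨hge, by rw [etake2]; exact hh⟩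
      rw [pvBGo, if_neg hi0, if_neg hnp]
      simp only [hgetd]
      rw [if_neg hs, ih (by omega), e1, pvTokens_append_single _ _ hlast]
      simp [hs]

-- A's hydrogen loop is append of n copies of "H"
theorem pvFoldl_H (ats : List String) (n : Nat) :
    (List.range n).foldl (fun l _ => l ++ ["H"]) ats = ats ++ List.replicate n "H" := by
  induction n with
  | zero => simp
  | succ n ih =>
      rw [List.range_succ, List.foldl_append, ih]
      simp [List.replicate_succ']

-- ===== VERDICT (by name: the statement is the Claim_ definition above) =====
theorem extract_atom_types_from_smiles_spec : Claim_equal_extract_atom_types_from_smiles := by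
  intro smiles _
  unfold Spec_extract_atom_types_from_smiles
  unfold extract_atom_types_from_smiles extract_atom_types_from_smiles_alt
  rw [pvFoldl_H, pvAGo_eq_tokens, pvBGo_eq_tokens _ _ _ (le_refl _), List.take_length]
  simp
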